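-- pv_equiv track=rewrite | github.com/Ariral-Terminal/Heroku-things | autoclicker.py | normalize_nick
-- ===== SOURCE A (Python) =====
-- import unicodedata
--
-- def normalize_nick(nick):
--     if not nick: return ""
--     normalized = unicodedata.normalize('NFKD', nick)
--     cleaned = ''.join(
--         c for c in normalized
--         if c.isalnum() or c.isspace() or (0x0400 <= ord(c) <= 0x04FF)
--     )
--     return ' '.join(cleaned.strip().split()).lower()
-- ===== SOURCE B (Python) =====
-- import unicodedata
--
-- def normalize_nick(nick):
--     # Single streaming tokenizer: fuses filter + strip + split into one pass.
--     if not nick: return ""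
--     words, buf = [], []
--     for c in unicodedata.normalize('NFKD', nick):
--         if c.isspace():
--             if buf:
--                 words.append(''.join(buf))
--                 buf = []
--         elif c.isalnum() or 0x0400 <= ord(c) <= 0x04FF:
--             buf.append(c)
--     if buf:
--         words.append(''.join(buf))
--     return ' '.join(words).lower()
-- ===== Notes on version B (the rewrite author's own statement) =====
-- stated objective: alternative
-- what changed: Replaces the filter-comprehension + strip + split + rejoin pipeline with a single streaming tokenizer that classifies each character once, flushing a word buffer at whitespace.
import Mathlib
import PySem

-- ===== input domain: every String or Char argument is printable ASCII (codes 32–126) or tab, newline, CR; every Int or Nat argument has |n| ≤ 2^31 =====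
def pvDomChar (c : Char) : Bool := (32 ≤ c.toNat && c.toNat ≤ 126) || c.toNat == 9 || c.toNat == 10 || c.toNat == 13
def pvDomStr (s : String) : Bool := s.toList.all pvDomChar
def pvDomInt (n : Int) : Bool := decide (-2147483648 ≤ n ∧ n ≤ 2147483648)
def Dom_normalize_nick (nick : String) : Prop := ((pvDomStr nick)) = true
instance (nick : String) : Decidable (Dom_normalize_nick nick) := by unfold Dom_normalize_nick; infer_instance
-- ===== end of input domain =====

-- B fuses A's filter/strip/split/join pipeline into one streaming tokenizer (objective: alternative, same cost).
-- On the ASCII input domain unicodedata.normalize('NFKD', nick) is the identity, so both ports omit it.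

-- ===== PORT A =====
-- the filter predicate of A's comprehension: c.isalnum() or c.isspace() or 0x0400 <= ord(c) <= 0x04FF
def pvKeep (c : Char) : Bool :=
  PySem.Chars.isalnum c || PySem.Chars.isspace c || (decide (0x0400 ≤ c.toNat) && decide (c.toNat ≤ 0x04FF))

def normalize_nick (nick : String) : String :=
  if nick.toList.isEmpty then "" else
    -- normalized = nick (NFKD identity on the ASCII domain)
    let cleaned := nick.toList.filter pvKeep
    String.ofList (PySem.Chars.lower (PySem.Chars.join [' '] (PySem.Chars.split₀ (PySem.Chars.strip cleaned))))

-- ===== PORT B =====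
-- one pass over the characters: flush buffer at whitespace, append kept characters, ignore the rest
def pvAltGo : List Char → List Char → List (List Char)
  | [], buf => if buf = [] then [] else [buf]
  | c :: rest, buf =>
    if PySem.Chars.isspace c then
      (if buf = [] then pvAltGo rest [] else buf :: pvAltGo rest [])
    else if PySem.Chars.isalnum c || (decide (0x0400 ≤ c.toNat) && decide (c.toNat ≤ 0x04FF)) then
      pvAltGo rest (buf ++ [c])
    else
      pvAltGo rest buf

def normalize_nick_alt (nick : String) : String :=
  if nick.toList.isEmpty then "" else
    String.ofList (PySem.Chars.lower (PySem.Chars.join [' '] (pvAltGo nick.toList [])))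

-- ===== PRECONDITION & SPEC =====
def Spec_normalize_nick (nick : String) (out : String) : Prop := out = normalize_nick_alt nick
instance (nick : String) (out : String) : Decidable (Spec_normalize_nick nick out) := by unfold Spec_normalize_nick; infer_instance

-- ===== CLAIM (what is proved, stated in full; the proofs are below) =====
def Claim_equal_normalize_nick : Prop := ∀ (nick : String), Dom_normalize_nick nick → Spec_normalize_nick nick (normalize_nick nick)

-- ===== LEMMAS AND PROOFS =====

-- go on an all-whitespace tail just flushes the buffer
lemma go_all_space (ws : List Char) (h : ∀ c ∈ ws, PySem.Chars.isspace c = true) :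
    ∀ (cur : List Char) (acc : List (List Char)),
      PySem.Chars.split₀.go ws cur acc
        = if cur.isEmpty then acc.reverse else (cur.reverse :: acc).reverse := by
  induction ws with
  | nil => intro cur acc; rfl
  | cons c rest ih =>
    intro cur acc
    have hc : PySem.Chars.isspace c = true := h c (by simp)
    have hr : ∀ x ∈ rest, PySem.Chars.isspace x = true := fun x hx => h x (by simp [hx])
    simp only [PySem.Chars.split₀.go, hc, if_true]
    by_cases hcur : cur.isEmpty
    · simp [hcur, ih hr]
    · simp [hcur, ih hr]

-- appending whitespace does not change go's result
lemma go_append_space (y ws : List Char) (h : ∀ c ∈ ws, PySem.Chars.isspace c = true) :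
    ∀ (cur : List Char) (acc : List (List Char)),
      PySem.Chars.split₀.go (y ++ ws) cur acc = PySem.Chars.split₀.go y cur acc := by
  induction y with
  | nil =>
    intro cur acc
    simp only [List.nil_append]
    rw [go_all_space ws h]
    by_cases hcur : cur.isEmpty <;> simp [PySem.Chars.split₀.go, hcur]
  | cons c rest ih =>
    intro cur acc
    simp only [List.cons_append, PySem.Chars.split₀.go]
    by_cases hc : PySem.Chars.isspace c = true
    · by_cases hcur : cur.isEmpty <;> simp [hc, hcur, ih]
    · simp [hc, ih]

-- stripping leading whitespace does not change go (with an empty buffer)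
lemma go_lstrip (y : List Char) :
    ∀ (acc : List (List Char)),
      PySem.Chars.split₀.go (PySem.Chars.lstrip y) [] acc = PySem.Chars.split₀.go y [] acc := by
  induction y with
  | nil => intro acc; rfl
  | cons c rest ih =>
    intro acc
    by_cases hc : PySem.Chars.isspace c = true
    · have : PySem.Chars.lstrip (c :: rest) = PySem.Chars.lstrip rest := by
        simp [PySem.Chars.lstrip, hc]
      rw [this, ih]
      simp [PySem.Chars.split₀.go, hc]
    · have : PySem.Chars.lstrip (c :: rest) = c :: rest := by
        simp [PySem.Chars.lstrip, hc]
      rw [this]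

-- main correspondence: split₀.go over the filtered characters is B's tokenizer
lemma go_filter_eq_altGo (s : List Char) :
    ∀ (cur : List Char) (acc : List (List Char)),
      PySem.Chars.split₀.go (s.filter pvKeep) cur acc = acc.reverse ++ pvAltGo s cur.reverse := by
  induction s with
  | nil =>
    intro cur acc
    simp only [List.filter_nil, PySem.Chars.split₀.go, pvAltGo]
    by_cases hcur : cur.isEmpty
    · simp [List.isEmpty_iff.mp hcur]
    · have : cur ≠ [] := by simpa [List.isEmpty_iff] using hcur
      simp [hcur, this]
  | cons c rest ih =>
    intro cur acc
    by_cases hk : pvKeep c = true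
    · simp only [List.filter_cons, hk, if_true]
      by_cases hc : PySem.Chars.isspace c = true
      · simp only [PySem.Chars.split₀.go, hc, if_true]
        by_cases hcur : cur.isEmpty
        · have hnil : cur = [] := List.isEmpty_iff.mp hcur
          simp [hnil, ih, pvAltGo, hc]
        · have hne : cur ≠ [] := by simpa [List.isEmpty_iff] using hcur
          simp [pvAltGo, hc, hne, ih]
      · have halnum : (PySem.Chars.isalnum c
            || (decide (0x0400 ≤ c.toNat) && decide (c.toNat ≤ 0x04FF))) = true := by
          simp only [pvKeep, Bool.or_eq_true] at hk ⊢
          rcases hk with (h | h) | h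
          · exact Or.inl h
          · exact absurd h hc
          · exact Or.inr h
        simp [PySem.Chars.split₀.go, hc, pvAltGo, halnum, ih]
    · have hc : ¬ PySem.Chars.isspace c = true := fun h => hk (by simp [pvKeep, h])
      have halnum : (PySem.Chars.isalnum c
          || (decide (0x0400 ≤ c.toNat) && decide (c.toNat ≤ 0x04FF))) = false := by
        rcases Bool.eq_false_or_eq_true (PySem.Chars.isalnum c
            || (decide (0x0400 ≤ c.toNat) && decide (c.toNat ≤ 0x04FF))) with h | h
        · exfalso; apply hk
          rcases Bool.or_eq_true_iff.mp h with h | h <;> simp [pvKeep, h]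
        · exact h
      simp only [List.filter_cons, hk, pvAltGo, hc, halnum]
      exact ih cur acc

-- the word lists of the two pipelines coincide
lemma words_eq (s : List Char) :
    PySem.Chars.split₀ (PySem.Chars.strip (s.filter pvKeep)) = pvAltGo s [] := by
  set x := s.filter pvKeep with hx
  have hdecomp : PySem.Chars.rstrip (PySem.Chars.lstrip x)
        ++ (((PySem.Chars.lstrip x).reverse.takeWhile PySem.Chars.isspace).reverse)
      = PySem.Chars.lstrip x := by
    simp only [PySem.Chars.rstrip]
    rw [← List.reverse_append, List.takeWhile_append_dropWhile, List.reverse_reverse]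
  have hws : ∀ c ∈ ((PySem.Chars.lstrip x).reverse.takeWhile PySem.Chars.isspace).reverse,
      PySem.Chars.isspace c = true := by
    intro c hc
    exact List.mem_takeWhile_imp (List.mem_reverse.mp hc)
  calc PySem.Chars.split₀ (PySem.Chars.strip x)
      = PySem.Chars.split₀.go (PySem.Chars.rstrip (PySem.Chars.lstrip x)) [] [] := rfl
    _ = PySem.Chars.split₀.go (PySem.Chars.lstrip x) [] [] := by
        conv_rhs => rw [← hdecomp]
        rw [go_append_space _ _ hws]
    _ = PySem.Chars.split₀.go x [] [] := go_lstrip x []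
    _ = pvAltGo s [] := by simpa using go_filter_eq_altGo s [] []

-- ===== VERDICT (by name: the statement is the Claim_ definition above) =====
theorem normalize_nick_spec : Claim_equal_normalize_nick := by
  intro nick _
  unfold Spec_normalize_nick normalize_nick normalize_nick_alt
  by_cases h : nick.toList.isEmpty
  · simp [h]
  · simp only [h]
    rw [words_eq]
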